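-- pv_equiv track=rewrite | github.com/agarwalpratik/adventofcode2025 | day12/day121.py | can_fit_region
-- ===== SOURCE A (Python) =====
-- def orientations(shape):
--     """Return all distinct rotated/flipped versions and their widths/heights."""
--     grids = set()
--
--     grid = shape
--
--     def rotate(g):
--         return ["".join(g[::-1][r][c] for r in range(len(g)))
--                 for c in range(len(g[0]))]
--
--     def flip(g):
--         return [row[::-1] for row in g]
--
--     work = grid
--     for _ in range(4):
--         work = rotate(work)
--         grids.add(tuple(work))
--         grids.add(tuple(flip(work)))
--
--     sizes = []
--     for g in grids:
--         rows = len(g)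
--         cols = len(g[0])
--         w = cols
--         h = rows
--         # bounding box of '#'
--         xs = []
--         ys = []
--         for y in range(h):
--             for x in range(w):
--                 if g[y][x] == "#":
--                     xs.append(x)
--                     ys.append(y)
--         if xs:
--             bw = max(xs) - min(xs) + 1
--             bh = max(ys) - min(ys) + 1
--             sizes.append((bw, bh))
--
--     return sizes
--
-- def shape_area(shape):
--     return sum(row.count("#") for row in shape)
--
-- def can_fit_region(W, H, shapes, counts):
--     total_area = 0
--
--     for idx, c in enumerate(counts):
--         if c == 0:
--             continue
--         if idx not in shapes:
--             return False
--
--         shp = shapes[idx]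
--         area = shape_area(shp)
--         total_area += area * c
--
--         oris = orientations(shp)
--
--         # Must fit at least one orientation
--         fits = False
--         for w, h in oris:
--             if (w <= W and h <= H) or (w <= H and h <= W):
--                 fits = True
--                 break
--         if not fits:
--             return False
--
--     # Area check
--     return total_area <= W * H
-- ===== SOURCE B (Python) =====
-- def can_fit_region(W, H, shapes, counts):
--     # One pass per shape: bounding box of '#' (within the len(row0)-wide frame,
--     # as the rotation code frames it) plus the symmetric fit test; rotations
--     # only swap the bounding-box dimensions and flips preserve them.
--     total_area = 0
--     for idx, c in enumerate(counts):
--         if c == 0: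
--             continue
--         if idx not in shapes:
--             return False
--         g = shapes[idx]
--         cols = len(g[0]) if g else 0
--         pts = [(x, y)
--                for y, row in enumerate(g)
--                for x, ch in enumerate(row[:cols])
--                if ch == "#"]
--         if not pts:
--             return False
--         xs = [p[0] for p in pts]
--         ys = [p[1] for p in pts]
--         bw = max(xs) - min(xs) + 1
--         bh = max(ys) - min(ys) + 1
--         if not ((bw <= W and bh <= H) or (bw <= H and bh <= W)):
--             return False
--         total_area += sum(row.count("#") for row in g) * c
--     return total_area <= W * H
-- ===== Notes on version B (the rewrite author's own statement) =====
-- stated objective: simpler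
-- what changed: Replaces the whole orientation machinery (8 rotated/flipped grids, a set, per-orientation bounding boxes) by a single scan of each shape computing one bounding box, using that rotations only swap its dimensions and flips preserve them, so one symmetric test (bw<=W and bh<=H) or (bw<=H and bh<=W) suffices.
-- outside the precondition, e.g. on can_fit_region(0, 0, {0: ['#'], 1: []}, [1, 1]): A returns False, B returns False
import Mathlib
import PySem

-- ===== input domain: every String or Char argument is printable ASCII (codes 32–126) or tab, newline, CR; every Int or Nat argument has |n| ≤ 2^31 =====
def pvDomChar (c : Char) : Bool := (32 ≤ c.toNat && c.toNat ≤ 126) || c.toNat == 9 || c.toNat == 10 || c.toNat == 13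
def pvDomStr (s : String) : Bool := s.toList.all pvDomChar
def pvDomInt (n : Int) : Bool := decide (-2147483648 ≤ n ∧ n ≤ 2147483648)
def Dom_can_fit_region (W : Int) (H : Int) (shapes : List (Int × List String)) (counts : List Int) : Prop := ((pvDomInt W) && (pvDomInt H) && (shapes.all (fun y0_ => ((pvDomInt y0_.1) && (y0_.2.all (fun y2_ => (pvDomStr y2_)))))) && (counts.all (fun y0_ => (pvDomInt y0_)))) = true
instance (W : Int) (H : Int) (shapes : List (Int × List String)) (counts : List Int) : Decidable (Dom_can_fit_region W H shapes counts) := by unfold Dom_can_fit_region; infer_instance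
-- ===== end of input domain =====

-- B replaces A's 8-orientation enumeration by one bounding-box scan per shape
-- (rotations swap the box's dimensions, flips keep them), same return value.

-- ===== PORT A =====
-- len(g[0]) (default for the out-of-Pre_ empty case, where Python raises)
def pvCols (g : List String) : Nat := (g.headD "").toList.length
-- g[y][x] with defaults (in-range on every access the admitted inputs make)
def pvCharAt (g : List String) (y x : Nat) : Char := ((g.getD y "").toList).getD x ' '
-- rotate(g) = ["".join(g[::-1][r][c] for r in range(len(g))) for c in range(len(g[0]))]
def pvRotate (g : List String) : List String :=
  (List.range (pvCols g)).map (fun c =>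
    String.ofList ((List.range g.length).map (fun r => pvCharAt g.reverse r c)))
-- flip(g) = [row[::-1] for row in g]
def pvFlip (g : List String) : List String := g.map (fun row => String.ofList row.toList.reverse)
-- shape_area
def pvShapeArea (g : List String) : Int := (g.map (fun row => (PySem.Str.count row "#" : Int))).sum
-- the set `grids` built by the 4-step rotate/flip loop of orientations()
def pvGrids (g : List String) : PySem.Set (List String) :=
  ((List.range 4).foldl (fun (st : List String × PySem.Set (List String)) _ =>
      let w := pvRotate st.1
      (w, PySem.Set.add (PySem.Set.add st.2 w) (pvFlip w)))
    (g, (PySem.Set.empty : PySem.Set (List String)))).2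
-- the nested y/x loop collecting xs and ys
def pvScan (g : List String) : List Nat × List Nat :=
  (List.range g.length).foldl (fun acc y =>
    (List.range (pvCols g)).foldl (fun acc2 x =>
      if pvCharAt g y x = '#' then (acc2.1 ++ [x], acc2.2 ++ [y]) else acc2) acc) ([], [])
-- the sizes list of orientations() (max()/min() on lists the guard keeps nonempty)
def pvSizes (gs : List (List String)) : List (Nat × Nat) :=
  gs.foldl (fun acc g =>
    let p := pvScan g
    if p.1 ≠ [] then
      acc ++ [(p.1.max?.getD 0 - p.1.min?.getD 0 + 1, p.2.max?.getD 0 - p.2.min?.getD 0 + 1)]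
    else acc) []
-- (w <= W and h <= H) or (w <= H and h <= W)
def pvFit (W H : Int) (s : Nat × Nat) : Bool :=
  decide ((((s.1 : Int)) ≤ W ∧ ((s.2 : Int)) ≤ H) ∨ (((s.1 : Int)) ≤ H ∧ ((s.2 : Int)) ≤ W))
-- the main for-loop over enumerate(counts) with its early returns
def pvLoopA (W H : Int) (shapes : List (Int × List String)) :
    List Int → Nat → Int → Bool
  | [], _, total => decide (total ≤ W * H)
  | c :: rest, idx, total =>
    if c = 0 then pvLoopA W H shapes rest (idx + 1) total
    else
      match (PySem.Dict.mk shapes).get? (idx : Int) with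
      | none => false
      | some shp =>
          let total' := total + pvShapeArea shp * c
          if (pvSizes (pvGrids shp)).any (pvFit W H) then pvLoopA W H shapes rest (idx + 1) total'
          else false

def can_fit_region (W : Int) (H : Int) (shapes : List (Int × List String)) (counts : List Int) : Bool :=
  pvLoopA W H shapes counts 0 0

-- ===== PORT B =====
-- cols = len(g[0]) if g else 0
def pvColsB (g : List String) : Nat := if g = [] then 0 else (g.headD "").toList.length
-- pts = [(x, y) for y, row in enumerate(g) for x, ch in enumerate(row[:cols]) if ch == "#"]
def pvPts (g : List String) : List (Nat × Nat) :=
  g.zipIdx.flatMap (fun ry =>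
    (ry.1.toList.take (pvColsB g)).zipIdx.filterMap (fun cx =>
      if cx.1 = '#' then some (cx.2, ry.2) else none))
-- the single loop over enumerate(counts) of B
def pvLoopB (W H : Int) (shapes : List (Int × List String)) :
    List Int → Nat → Int → Bool
  | [], _, total => decide (total ≤ W * H)
  | c :: rest, idx, total =>
    if c = 0 then pvLoopB W H shapes rest (idx + 1) total
    else
      match (PySem.Dict.mk shapes).get? (idx : Int) with
      | none => false
      | some g =>
          let pts := pvPts g
          if pts = [] then false
          else
            let xs := pts.map (·.1)
            let ys := pts.map (·.2)
            let bw := xs.max?.getD 0 - xs.min?.getD 0 + 1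
            let bh := ys.max?.getD 0 - ys.min?.getD 0 + 1
            if (((bw : Int)) ≤ W ∧ ((bh : Int)) ≤ H) ∨ (((bw : Int)) ≤ H ∧ ((bh : Int)) ≤ W) then
              pvLoopB W H shapes rest (idx + 1)
                (total + (g.map (fun row => (PySem.Str.count row "#" : Int))).sum * c)
            else false

def can_fit_region_alt (W : Int) (H : Int) (shapes : List (Int × List String)) (counts : List Int) : Bool :=
  pvLoopB W H shapes counts 0 0

-- ===== PRECONDITION & SPEC =====
-- a shape A can process without raising: nonempty, nonempty first row, no row shorter than the first
def pvGoodShape (g : List String) : Bool :=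
  !g.isEmpty && decide (0 < (g.headD "").toList.length)
    && g.all (fun row => decide ((g.headD "").toList.length ≤ row.toList.length))
-- Pre_ excludes inputs where a shape referenced by a nonzero count (and not shadowed by an
-- earlier missing index, on which A returns False before reaching it) is empty or has a row
-- shorter than its first row: on those A's rotate() raises IndexError (so A returns no value),
-- except for a few inputs where an earlier non-fitting shape already makes A return False (see cites).
def Pre_can_fit_region (W : Int) (H : Int) (shapes : List (Int × List String)) (counts : List Int) : Prop :=
  ∀ i, i < counts.length → counts.getD i 0 ≠ 0 →
    (∀ j, j ≤ i → counts.getD j 0 ≠ 0 → (PySem.Dict.mk shapes).contains ((j : Nat) : Int) = true) →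
    ((PySem.Dict.mk shapes).get? (i : Int)).all pvGoodShape = true
instance (W : Int) (H : Int) (shapes : List (Int × List String)) (counts : List Int) : Decidable (Pre_can_fit_region W H shapes counts) := by unfold Pre_can_fit_region; infer_instance

def pvWitness_can_fit_region : Int × Int × (List (Int × List String)) × List Int :=
  (2, 2, [((0 : Int), ["##", ".#"])], [(1 : Int)])

def Spec_can_fit_region (W : Int) (H : Int) (shapes : List (Int × List String)) (counts : List Int) (out : Bool) : Prop := out = can_fit_region_alt W H shapes counts
instance (W : Int) (H : Int) (shapes : List (Int × List String)) (counts : List Int) (out : Bool) : Decidable (Spec_can_fit_region W H shapes counts out) := by unfold Spec_can_fit_region; infer_instance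

-- ===== CLAIM (what is proved, stated in full; the proofs are below) =====
def Claim_equal_can_fit_region : Prop := ∀ (W : Int) (H : Int) (shapes : List (Int × List String)) (counts : List Int), Dom_can_fit_region W H shapes counts → Pre_can_fit_region W H shapes counts → Spec_can_fit_region W H shapes counts (can_fit_region W H shapes counts)

-- ===== LEMMAS AND PROOFS =====

-- membership view of the coordinate lists
def HasX (g : List String) (a : Nat) : Prop :=
  ∃ y, y < g.length ∧ a < pvCols g ∧ pvCharAt g y a = '#'
def HasY (g : List String) (b : Nat) : Prop :=
  ∃ x, x < pvCols g ∧ b < g.length ∧ pvCharAt g b x = '#'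
-- the bounding box A computes per grid (none = no '#')
def pvBBox (g : List String) : Option (Nat × Nat) :=
  if (pvScan g).1 = [] then none
  else some ((pvScan g).1.max?.getD 0 - (pvScan g).1.min?.getD 0 + 1,
             (pvScan g).2.max?.getD 0 - (pvScan g).2.min?.getD 0 + 1)

def RectGE (g : List String) : Prop := ∀ row ∈ g, pvCols g ≤ row.toList.length
def RectEQ (g : List String) : Prop := ∀ row ∈ g, row.toList.length = pvCols g

lemma scan_inner (g : List String) (y : Nat) (l : List Nat) (A B : List Nat) :
    l.foldl (fun acc2 x => if pvCharAt g y x = '#' then (acc2.1 ++ [x], acc2.2 ++ [y]) else acc2) (A, B)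
      = (A ++ l.filter (fun x => pvCharAt g y x = '#'),
         B ++ (l.filter (fun x => pvCharAt g y x = '#')).map (fun _ => y)) := by
  induction l generalizing A B with
  | nil => simp
  | cons x xs ih =>
      by_cases h : pvCharAt g y x = '#' <;> simp [h, ih]

lemma scan_outer (g : List String) (l : List Nat) (A B : List Nat) :
    l.foldl (fun acc y =>
        (List.range (pvCols g)).foldl (fun acc2 x =>
          if pvCharAt g y x = '#' then (acc2.1 ++ [x], acc2.2 ++ [y]) else acc2) acc) (A, B)
      = (A ++ l.flatMap (fun y => (List.range (pvCols g)).filter (fun x => pvCharAt g y x = '#')),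
         B ++ l.flatMap (fun y => ((List.range (pvCols g)).filter (fun x => pvCharAt g y x = '#')).map (fun _ => y))) := by
  induction l generalizing A B with
  | nil => simp
  | cons y ys ih =>
      rw [List.foldl_cons, scan_inner, ih]
      simp [List.flatMap_cons]

lemma scan_eq (g : List String) :
    pvScan g = ((List.range g.length).flatMap (fun y => (List.range (pvCols g)).filter (fun x => pvCharAt g y x = '#')),
                (List.range g.length).flatMap (fun y => ((List.range (pvCols g)).filter (fun x => pvCharAt g y x = '#')).map (fun _ => y))) := by
  unfold pvScan
  rw [scan_outer]
  simp only [List.nil_append]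

lemma mem_scan_fst (g : List String) (a : Nat) : a ∈ (pvScan g).1 ↔ HasX g a := by
  rw [scan_eq]
  simp only [List.mem_flatMap, List.mem_filter, List.mem_range, HasX, decide_eq_true_eq]

lemma mem_scan_snd (g : List String) (b : Nat) : b ∈ (pvScan g).2 ↔ HasY g b := by
  rw [scan_eq]
  simp only [List.mem_flatMap, List.mem_map, List.mem_filter, List.mem_range, HasY,
    decide_eq_true_eq]
  constructor
  · rintro ⟨y, hy, x, ⟨hx, hc⟩, rfl⟩; exact ⟨x, hx, hy, hc⟩
  · rintro ⟨x, hx, hb, hc⟩; exact ⟨b, hb, x, ⟨hx, hc⟩, rfl⟩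

lemma max_getD_eq (l : List Nat) (v : Nat) (hv : v ∈ l) (hub : ∀ a ∈ l, a ≤ v) :
    l.max?.getD 0 = v := by
  cases h : l.max? with
  | none => exact absurd (List.max?_eq_none_iff.mp h ▸ hv) (by simp)
  | some m =>
      have hm : m ∈ l := List.max?_mem h
      have h1 : m ≤ v := hub m hm
      have h2 : v ≤ m := ((List.max?_le_iff h).mp le_rfl) v hv
      simpa using le_antisymm h1 h2

lemma min_getD_eq (l : List Nat) (v : Nat) (hv : v ∈ l) (hlb : ∀ a ∈ l, v ≤ a) :
    l.min?.getD 0 = v := by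
  cases h : l.min? with
  | none => exact absurd (List.min?_eq_none_iff.mp h ▸ hv) (by simp)
  | some m =>
      have hm : m ∈ l := List.min?_mem h
      have h1 : v ≤ m := hlb m hm
      have h2 : m ≤ v := ((List.le_min?_iff h).mp le_rfl) v hv
      simpa using le_antisymm h2 h1

lemma hasX_ex_iff (g : List String) : (∃ a, HasX g a) ↔ (∃ b, HasY g b) := by
  constructor
  · rintro ⟨a, y, hy, ha, hc⟩; exact ⟨y, a, ha, hy, hc⟩
  · rintro ⟨b, x, hx, hb, hc⟩; exact ⟨x, b, hb, hx, hc⟩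

lemma scan_fst_nil_iff (g : List String) : (pvScan g).1 = [] ↔ ¬ ∃ a, HasX g a := by
  rw [List.eq_nil_iff_forall_not_mem]
  simp [mem_scan_fst]

lemma max_getD_spec (l : List Nat) (h : l ≠ []) :
    l.max?.getD 0 ∈ l ∧ ∀ a ∈ l, a ≤ l.max?.getD 0 := by
  cases hm : l.max? with
  | none => exact absurd (List.max?_eq_none_iff.mp hm) h
  | some m =>
      exact ⟨by simpa using List.max?_mem hm, by simpa using (List.max?_le_iff hm).mp le_rfl⟩

lemma min_getD_spec (l : List Nat) (h : l ≠ []) :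
    l.min?.getD 0 ∈ l ∧ ∀ a ∈ l, l.min?.getD 0 ≤ a := by
  cases hm : l.min? with
  | none => exact absurd (List.min?_eq_none_iff.mp hm) h
  | some m =>
      exact ⟨by simpa using List.min?_mem hm, by simpa using (List.le_min?_iff hm).mp le_rfl⟩

lemma bbox_none (g : List String) (h : ¬ ∃ a, HasX g a) : pvBBox g = none := by
  unfold pvBBox
  rw [if_pos ((scan_fst_nil_iff g).mpr h)]

-- pvBBox from extremal witnesses of the two membership sets
lemma bbox_some (g : List String) (x₀ x₁ y₀ y₁ : Nat)
    (hx0 : HasX g x₀) (hx1 : HasX g x₁) (hy0 : HasY g y₀) (hy1 : HasY g y₁)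
    (hxb : ∀ a, HasX g a → x₀ ≤ a ∧ a ≤ x₁) (hyb : ∀ b, HasY g b → y₀ ≤ b ∧ b ≤ y₁) :
    pvBBox g = some (x₁ - x₀ + 1, y₁ - y₀ + 1) := by
  have h1 : (pvScan g).1 ≠ [] := by
    rw [Ne, List.eq_nil_iff_forall_not_mem]
    intro h; exact h x₀ ((mem_scan_fst g x₀).mpr hx0)
  have hmax1 : (pvScan g).1.max?.getD 0 = x₁ :=
    max_getD_eq _ _ ((mem_scan_fst g x₁).mpr hx1)
      (fun a ha => (hxb a ((mem_scan_fst g a).mp ha)).2)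
  have hmin1 : (pvScan g).1.min?.getD 0 = x₀ :=
    min_getD_eq _ _ ((mem_scan_fst g x₀).mpr hx0)
      (fun a ha => (hxb a ((mem_scan_fst g a).mp ha)).1)
  have hmax2 : (pvScan g).2.max?.getD 0 = y₁ :=
    max_getD_eq _ _ ((mem_scan_snd g y₁).mpr hy1)
      (fun b hb => (hyb b ((mem_scan_snd g b).mp hb)).2)
  have hmin2 : (pvScan g).2.min?.getD 0 = y₀ :=
    min_getD_eq _ _ ((mem_scan_snd g y₀).mpr hy0)
      (fun b hb => (hyb b ((mem_scan_snd g b).mp hb)).1)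
  unfold pvBBox
  rw [if_neg h1, hmax1, hmin1, hmax2, hmin2]

-- characterisation of pvBBox when there is a '#'
lemma bbox_spec (g : List String) (hne : ∃ a, HasX g a) :
    ∃ x₀ x₁ y₀ y₁, HasX g x₀ ∧ HasX g x₁ ∧ HasY g y₀ ∧ HasY g y₁ ∧
      (∀ a, HasX g a → x₀ ≤ a ∧ a ≤ x₁) ∧ (∀ b, HasY g b → y₀ ≤ b ∧ b ≤ y₁) ∧
      pvBBox g = some (x₁ - x₀ + 1, y₁ - y₀ + 1) := by
  have h1 : (pvScan g).1 ≠ [] := by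
    rw [Ne, List.eq_nil_iff_forall_not_mem]
    obtain ⟨a, ha⟩ := hne
    intro h; exact h a ((mem_scan_fst g a).mpr ha)
  have h2 : (pvScan g).2 ≠ [] := by
    rw [Ne, List.eq_nil_iff_forall_not_mem]
    obtain ⟨b, hb⟩ := (hasX_ex_iff g).mp hne
    intro h; exact h b ((mem_scan_snd g b).mpr hb)
  obtain ⟨hmx1, hmx2⟩ := max_getD_spec _ h1
  obtain ⟨hmn1, hmn2⟩ := min_getD_spec _ h1
  obtain ⟨hMy1, hMy2⟩ := max_getD_spec _ h2
  obtain ⟨hmy1, hmy2⟩ := min_getD_spec _ h2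
  refine ⟨(pvScan g).1.min?.getD 0, (pvScan g).1.max?.getD 0,
          (pvScan g).2.min?.getD 0, (pvScan g).2.max?.getD 0,
          (mem_scan_fst g _).mp hmn1, (mem_scan_fst g _).mp hmx1,
          (mem_scan_snd g _).mp hmy1, (mem_scan_snd g _).mp hMy1,
          fun a ha => ⟨hmn2 a ((mem_scan_fst g a).mpr ha), hmx2 a ((mem_scan_fst g a).mpr ha)⟩,
          fun b hb => ⟨hmy2 b ((mem_scan_snd g b).mpr hb), hMy2 b ((mem_scan_snd g b).mpr hb)⟩, ?_⟩
  unfold pvBBox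
  rw [if_neg h1]

-- rotate: geometry
lemma length_rotate (g : List String) : (pvRotate g).length = pvCols g := by
  simp [pvRotate]

lemma cols_rotate (g : List String) (hC : 0 < pvCols g) : pvCols (pvRotate g) = g.length := by
  obtain ⟨k, hk⟩ : ∃ k, pvCols g = k + 1 := ⟨pvCols g - 1, by omega⟩
  unfold pvCols pvRotate
  rw [hk, List.range_succ_eq_map]
  simp

lemma charAt_rotate (g : List String) (r c : Nat) (hr : r < g.length) (hc : c < pvCols g) :
    pvCharAt (pvRotate g) c r = pvCharAt g (g.length - 1 - r) c := by
  have h1 : (pvRotate g).getD c ""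
      = String.ofList ((List.range g.length).map (fun r => pvCharAt g.reverse r c)) := by
    unfold pvRotate
    exact PySem.List.getD_map_range _ _ _ _ hc
  unfold pvCharAt
  rw [h1]
  simp only [String.toList_ofList]
  rw [PySem.List.getD_map_range _ _ _ _ hr]
  have h2 : g.reverse.getD r "" = g.getD (g.length - 1 - r) "" := by
    rw [List.getD_eq_getElem g.reverse "" (by simpa using hr),
        List.getD_eq_getElem g "" (by omega), List.getElem_reverse]
  unfold pvCharAt
  rw [h2]

lemma rectEQ_rotate (g : List String) (hC : 0 < pvCols g) : RectEQ (pvRotate g) := by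
  intro row hrow
  rw [cols_rotate g hC]
  unfold pvRotate at hrow
  obtain ⟨c, _, rfl⟩ := List.mem_map.mp hrow
  simp

lemma hasX_rotate (g : List String) (hC : 0 < pvCols g) (a : Nat) :
    HasX (pvRotate g) a ↔ a < g.length ∧ HasY g (g.length - 1 - a) := by
  unfold HasX HasY
  rw [length_rotate, cols_rotate g hC]
  constructor
  · rintro ⟨y, hy, ha, hchar⟩
    rw [charAt_rotate g a y ha hy] at hchar
    exact ⟨ha, y, hy, by omega, hchar⟩
  · rintro ⟨ha, x, hx, _, hchar⟩
    exact ⟨x, hx, ha, by rw [charAt_rotate g a x ha hx]; exact hchar⟩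

lemma hasY_rotate (g : List String) (hC : 0 < pvCols g) (b : Nat) :
    HasY (pvRotate g) b ↔ HasX g b := by
  unfold HasX HasY
  rw [length_rotate, cols_rotate g hC]
  constructor
  · rintro ⟨x, hx, hb, hchar⟩
    rw [charAt_rotate g x b hx hb] at hchar
    exact ⟨g.length - 1 - x, by omega, hb, hchar⟩
  · rintro ⟨y, hy, hb, hchar⟩
    refine ⟨g.length - 1 - y, by omega, hb, ?_⟩
    rw [charAt_rotate g (g.length - 1 - y) b (by omega) hb]
    have : g.length - 1 - (g.length - 1 - y) = y := by omega
    rw [this]; exact hchar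

lemma bbox_rotate (g : List String) (hC : 0 < pvCols g) :
    pvBBox (pvRotate g) = (pvBBox g).map Prod.swap := by
  by_cases hne : ∃ a, HasX g a
  · obtain ⟨x₀, x₁, y₀, y₁, hx0, hx1, hy0, hy1, hxb, hyb, hbox⟩ := bbox_spec g hne
    have hL : 0 < g.length := by
      obtain ⟨a, y, hy, _, _⟩ := hne; omega
    obtain ⟨x0y, _, hy0L, _⟩ := id hy0
    obtain ⟨x1y, _, hy1L, _⟩ := id hy1
    have hy01 : y₀ ≤ y₁ := (hyb y₁ hy1).1
    have hx01 : x₀ ≤ x₁ := (hxb x₁ hx1).1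
    have hbox' : pvBBox (pvRotate g) = some ((g.length - 1 - y₀) - (g.length - 1 - y₁) + 1, x₁ - x₀ + 1) := by
      apply bbox_some
      · refine (hasX_rotate g hC _).mpr ⟨by omega, ?_⟩
        have h : g.length - 1 - (g.length - 1 - y₁) = y₁ := by omega
        rw [h]; exact hy1
      · refine (hasX_rotate g hC _).mpr ⟨by omega, ?_⟩
        have h : g.length - 1 - (g.length - 1 - y₀) = y₀ := by omega
        rw [h]; exact hy0
      · exact (hasY_rotate g hC _).mpr hx0
      · exact (hasY_rotate g hC _).mpr hx1
      · intro a ha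
        obtain ⟨haL, hY⟩ := (hasX_rotate g hC a).mp ha
        have := hyb _ hY
        omega
      · intro b hb
        exact hxb b ((hasY_rotate g hC b).mp hb)
    rw [hbox', hbox]
    have h1 : (g.length - 1 - y₀) - (g.length - 1 - y₁) + 1 = y₁ - y₀ + 1 := by omega
    rw [h1]
    rfl
  · have hrot : ¬ ∃ a, HasX (pvRotate g) a := by
      rintro ⟨a, ha⟩
      obtain ⟨_, hY⟩ := (hasX_rotate g hC a).mp ha
      exact hne ((hasX_ex_iff g).mpr ⟨_, hY⟩)
    rw [bbox_none g hne, bbox_none _ hrot]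
    rfl

-- flip: geometry
lemma cols_flip (g : List String) (hg : g ≠ []) : pvCols (pvFlip g) = pvCols g := by
  obtain ⟨r, t, rfl⟩ := List.exists_cons_of_ne_nil hg
  simp [pvFlip, pvCols]

lemma charAt_flip (g : List String) (hEQ : RectEQ g) (y x : Nat)
    (hy : y < g.length) (hx : x < pvCols g) :
    pvCharAt (pvFlip g) y x = pvCharAt g y (pvCols g - 1 - x) := by
  have hgy : g.getD y "" = g[y] := List.getD_eq_getElem g "" hy
  have hrow : g.getD y "" ∈ g := by rw [hgy]; exact List.getElem_mem hy
  have hlen : (g.getD y "").toList.length = pvCols g := hEQ _ hrow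
  have h1 : (pvFlip g).getD y "" = String.ofList ((g.getD y "").toList.reverse) := by
    unfold pvFlip
    rw [List.getD_eq_getElem (g.map _) "" (by simpa using hy), List.getElem_map,
        List.getD_eq_getElem g "" hy]
  unfold pvCharAt
  rw [h1]
  simp only [String.toList_ofList]
  rw [List.getD_eq_getElem _ ' ' (by rw [List.length_reverse, hlen]; exact hx), List.getElem_reverse,
      List.getD_eq_getElem _ ' ' (by rw [hlen]; omega)]
  congr 1
  omega

lemma hasX_flip (g : List String) (hg : g ≠ []) (hEQ : RectEQ g) (a : Nat) :
    HasX (pvFlip g) a ↔ a < pvCols g ∧ HasX g (pvCols g - 1 - a) := by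
  unfold HasX
  rw [cols_flip g hg]
  have hlen : (pvFlip g).length = g.length := by simp [pvFlip]
  rw [hlen]
  constructor
  · rintro ⟨y, hy, ha, hchar⟩
    rw [charAt_flip g hEQ y a hy ha] at hchar
    exact ⟨ha, y, hy, by omega, hchar⟩
  · rintro ⟨ha, y, hy, _, hchar⟩
    refine ⟨y, hy, ha, ?_⟩
    rw [charAt_flip g hEQ y a hy ha]
    exact hchar

lemma hasY_flip (g : List String) (hg : g ≠ []) (hEQ : RectEQ g) (b : Nat) :
    HasY (pvFlip g) b ↔ HasY g b := by
  unfold HasY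
  rw [cols_flip g hg]
  have hlen : (pvFlip g).length = g.length := by simp [pvFlip]
  rw [hlen]
  constructor
  · rintro ⟨x, hx, hb, hchar⟩
    rw [charAt_flip g hEQ b x hb hx] at hchar
    exact ⟨pvCols g - 1 - x, by omega, hb, hchar⟩
  · rintro ⟨x, hx, hb, hchar⟩
    refine ⟨pvCols g - 1 - x, by omega, hb, ?_⟩
    rw [charAt_flip g hEQ b (pvCols g - 1 - x) hb (by omega)]
    have : pvCols g - 1 - (pvCols g - 1 - x) = x := by omega
    rw [this]; exact hchar

lemma bbox_flip (g : List String) (hg : g ≠ []) (hEQ : RectEQ g) :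
    pvBBox (pvFlip g) = pvBBox g := by
  by_cases hne : ∃ a, HasX g a
  · obtain ⟨x₀, x₁, y₀, y₁, hx0, hx1, hy0, hy1, hxb, hyb, hbox⟩ := bbox_spec g hne
    obtain ⟨y0x, _, hx0C, _⟩ := id hx0
    obtain ⟨y1x, _, hx1C, _⟩ := id hx1
    have hx01 : x₀ ≤ x₁ := (hxb x₁ hx1).1
    have hbox' : pvBBox (pvFlip g)
        = some ((pvCols g - 1 - x₀) - (pvCols g - 1 - x₁) + 1, y₁ - y₀ + 1) := by
      apply bbox_some
      · refine (hasX_flip g hg hEQ _).mpr ⟨by omega, ?_⟩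
        have h : pvCols g - 1 - (pvCols g - 1 - x₁) = x₁ := by omega
        rw [h]; exact hx1
      · refine (hasX_flip g hg hEQ _).mpr ⟨by omega, ?_⟩
        have h : pvCols g - 1 - (pvCols g - 1 - x₀) = x₀ := by omega
        rw [h]; exact hx0
      · exact (hasY_flip g hg hEQ _).mpr hy0
      · exact (hasY_flip g hg hEQ _).mpr hy1
      · intro a ha
        obtain ⟨haC, hX⟩ := (hasX_flip g hg hEQ a).mp ha
        have := hxb _ hX
        omega
      · intro b hb
        exact hyb b ((hasY_flip g hg hEQ b).mp hb)
    rw [hbox', hbox]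
    have h1 : (pvCols g - 1 - x₀) - (pvCols g - 1 - x₁) + 1 = x₁ - x₀ + 1 := by omega
    rw [h1]
  · have hflip : ¬ ∃ a, HasX (pvFlip g) a := by
      rintro ⟨a, ha⟩
      obtain ⟨_, hX⟩ := (hasX_flip g hg hEQ a).mp ha
      exact hne ⟨_, hX⟩
    rw [bbox_none g hne, bbox_none _ hflip]

lemma set_add_ne_nil {s : PySem.Set (List String)} {x : List String} :
    PySem.Set.add s x ≠ [] := by
  cases s with
  | nil => simp [PySem.Set.add, PySem.Set.contains]
  | cons a t => unfold PySem.Set.add; split <;> simp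

lemma swap_swap_opt (o : Option (Nat × Nat)) : (o.map Prod.swap).map Prod.swap = o := by
  cases o <;> simp

lemma grids_explicit (g : List String) :
    pvGrids g =
      PySem.Set.add (PySem.Set.add (PySem.Set.add (PySem.Set.add
        (PySem.Set.add (PySem.Set.add (PySem.Set.add (PySem.Set.add
          (PySem.Set.empty : PySem.Set (List String))
          (pvRotate g)) (pvFlip (pvRotate g)))
          (pvRotate (pvRotate g))) (pvFlip (pvRotate (pvRotate g))))
          (pvRotate (pvRotate (pvRotate g)))) (pvFlip (pvRotate (pvRotate (pvRotate g)))))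
          (pvRotate (pvRotate (pvRotate (pvRotate g))))) (pvFlip (pvRotate (pvRotate (pvRotate (pvRotate g))))) := by
  unfold pvGrids
  rw [show List.range 4 = [0, 1, 2, 3] from rfl]
  simp only [List.foldl_cons, List.foldl_nil]

lemma mem_grids (g : List String) (hR : 0 < g.length) (hC : 0 < pvCols g) :
    (∀ m ∈ pvGrids g, pvBBox m = pvBBox g ∨ pvBBox m = (pvBBox g).map Prod.swap)
      ∧ pvGrids g ≠ [] := by
  -- the four successive rotations and their facts
  have hb1 : pvBBox (pvRotate g) = (pvBBox g).map Prod.swap := bbox_rotate g hC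
  have h1len : 0 < (pvRotate g).length := by rw [length_rotate]; exact hC
  have h1cols : 0 < pvCols (pvRotate g) := by rw [cols_rotate g hC]; exact hR
  have h1ne : pvRotate g ≠ [] := List.length_pos_iff.mp h1len
  have h1EQ : RectEQ (pvRotate g) := rectEQ_rotate g hC
  have hb2 : pvBBox (pvRotate (pvRotate g)) = pvBBox g := by
    rw [bbox_rotate _ h1cols, hb1, swap_swap_opt]
  have h2len : 0 < (pvRotate (pvRotate g)).length := by rw [length_rotate]; exact h1cols
  have h2cols : 0 < pvCols (pvRotate (pvRotate g)) := by rw [cols_rotate _ h1cols]; exact h1len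
  have h2ne : pvRotate (pvRotate g) ≠ [] := List.length_pos_iff.mp h2len
  have h2EQ : RectEQ (pvRotate (pvRotate g)) := rectEQ_rotate _ h1cols
  have hb3 : pvBBox (pvRotate (pvRotate (pvRotate g))) = (pvBBox g).map Prod.swap := by
    rw [bbox_rotate _ h2cols, hb2]
  have h3len : 0 < (pvRotate (pvRotate (pvRotate g))).length := by rw [length_rotate]; exact h2cols
  have h3cols : 0 < pvCols (pvRotate (pvRotate (pvRotate g))) := by rw [cols_rotate _ h2cols]; exact h2len
  have h3ne : pvRotate (pvRotate (pvRotate g)) ≠ [] := List.length_pos_iff.mp h3len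
  have h3EQ : RectEQ (pvRotate (pvRotate (pvRotate g))) := rectEQ_rotate _ h2cols
  have hb4 : pvBBox (pvRotate (pvRotate (pvRotate (pvRotate g)))) = pvBBox g := by
    rw [bbox_rotate _ h3cols, hb3, swap_swap_opt]
  have h4len : 0 < (pvRotate (pvRotate (pvRotate (pvRotate g)))).length := by
    rw [length_rotate]; exact h3cols
  have h4ne : pvRotate (pvRotate (pvRotate (pvRotate g))) ≠ [] := List.length_pos_iff.mp h4len
  have h4EQ : RectEQ (pvRotate (pvRotate (pvRotate (pvRotate g)))) := rectEQ_rotate _ h3cols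
  have hf1 : pvBBox (pvFlip (pvRotate g)) = (pvBBox g).map Prod.swap := by
    rw [bbox_flip _ h1ne h1EQ, hb1]
  have hf2 : pvBBox (pvFlip (pvRotate (pvRotate g))) = pvBBox g := by
    rw [bbox_flip _ h2ne h2EQ, hb2]
  have hf3 : pvBBox (pvFlip (pvRotate (pvRotate (pvRotate g)))) = (pvBBox g).map Prod.swap := by
    rw [bbox_flip _ h3ne h3EQ, hb3]
  have hf4 : pvBBox (pvFlip (pvRotate (pvRotate (pvRotate (pvRotate g))))) = pvBBox g := by
    rw [bbox_flip _ h4ne h4EQ, hb4]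
  constructor
  · intro m hm
    rw [grids_explicit] at hm
    simp only [PySem.Set.mem_add] at hm
    have hempty : m ∉ (PySem.Set.empty : PySem.Set (List String)) := by
      simp [PySem.Set.empty]
    rcases hm with ((((((((hm | hm) | hm) | hm) | hm) | hm) | hm) | hm) | hm)
    · exact absurd hm hempty
    · rw [hm]; exact Or.inr hb1
    · rw [hm]; exact Or.inr hf1
    · rw [hm]; exact Or.inl hb2
    · rw [hm]; exact Or.inl hf2
    · rw [hm]; exact Or.inr hb3
    · rw [hm]; exact Or.inr hf3
    · rw [hm]; exact Or.inl hb4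
    · rw [hm]; exact Or.inl hf4
  · rw [grids_explicit]
    exact set_add_ne_nil

lemma sizes_eq (gs : List (List String)) :
    pvSizes gs = ((gs.filter (fun g => !decide ((pvScan g).1 = []))).map
      (fun g => ((pvScan g).1.max?.getD 0 - (pvScan g).1.min?.getD 0 + 1,
                 (pvScan g).2.max?.getD 0 - (pvScan g).2.min?.getD 0 + 1))) := by
  unfold pvSizes
  have h : (fun (acc : List (Nat × Nat)) (g : List String) =>
      let p := pvScan g
      if p.1 ≠ [] then
        acc ++ [(p.1.max?.getD 0 - p.1.min?.getD 0 + 1, p.2.max?.getD 0 - p.2.min?.getD 0 + 1)]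
      else acc)
      = (fun acc g =>
        if (fun g => !decide ((pvScan g).1 = [])) g = true then
          acc ++ [(fun (g : List String) =>
            ((pvScan g).1.max?.getD 0 - (pvScan g).1.min?.getD 0 + 1,
             (pvScan g).2.max?.getD 0 - (pvScan g).2.min?.getD 0 + 1)) g]
        else acc) := by
    funext acc g
    by_cases hg : (pvScan g).1 = [] <;> simp [hg]
  rw [h, PySem.List.foldl_append_if]
  simp

lemma fit_swap (W H : Int) (s : Nat × Nat) : pvFit W H s.swap = pvFit W H s := by
  simp only [pvFit, Prod.fst_swap, Prod.snd_swap]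
  rw [decide_eq_decide]
  tauto

lemma scan_nil_of_bbox_none (m : List String) (h : pvBBox m = none) : (pvScan m).1 = [] := by
  unfold pvBBox at h
  by_cases hs : (pvScan m).1 = []
  · exact hs
  · rw [if_neg hs] at h; exact absurd h (by simp)

lemma bbox_some_elim (m : List String) (s : Nat × Nat) (h : pvBBox m = some s) :
    (pvScan m).1 ≠ [] ∧
      ((pvScan m).1.max?.getD 0 - (pvScan m).1.min?.getD 0 + 1,
       (pvScan m).2.max?.getD 0 - (pvScan m).2.min?.getD 0 + 1) = s := by
  unfold pvBBox at h
  by_cases hs : (pvScan m).1 = []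
  · rw [if_pos hs] at h; exact absurd h (by simp)
  · rw [if_neg hs] at h; exact ⟨hs, Option.some.inj h⟩

lemma any_fit (W H : Int) (gs : List (List String)) (b : Option (Nat × Nat)) (hne : gs ≠ [])
    (hmem : ∀ m ∈ gs, pvBBox m = b ∨ pvBBox m = b.map Prod.swap) :
    (pvSizes gs).any (pvFit W H) = (b.map (pvFit W H)).getD false := by
  rw [sizes_eq]
  cases b with
  | none =>
      have hfil : gs.filter (fun g => !decide ((pvScan g).1 = [])) = [] := by
        rw [List.filter_eq_nil_iff]
        intro m hm
        have : (pvScan m).1 = [] := by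
          rcases hmem m hm with h | h
          · exact scan_nil_of_bbox_none m h
          · exact scan_nil_of_bbox_none m (by simpa using h)
        simp [this]
      rw [hfil]
      simp
  | some s =>
      have hall : ∀ m ∈ gs, (pvScan m).1 ≠ [] ∧
          pvFit W H ((pvScan m).1.max?.getD 0 - (pvScan m).1.min?.getD 0 + 1,
                     (pvScan m).2.max?.getD 0 - (pvScan m).2.min?.getD 0 + 1) = pvFit W H s := by
        intro m hm
        rcases hmem m hm with h | h
        · obtain ⟨h1, h2⟩ := bbox_some_elim m s h
          exact ⟨h1, by rw [h2]⟩
        · obtain ⟨h1, h2⟩ := bbox_some_elim m s.swap (by simpa using h)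
          refine ⟨h1, ?_⟩
          rw [h2, fit_swap]
      have hfil : gs.filter (fun g => !decide ((pvScan g).1 = [])) = gs := by
        rw [List.filter_eq_self]
        intro m hm
        simp [(hall m hm).1]
      rw [hfil, List.any_map]
      show gs.any (fun m => pvFit W H ((pvScan m).1.max?.getD 0 - (pvScan m).1.min?.getD 0 + 1,
        (pvScan m).2.max?.getD 0 - (pvScan m).2.min?.getD 0 + 1)) = _
      cases hv : pvFit W H s with
      | false =>
          simp only [Option.map_some, Option.getD_some]
          rw [hv, List.any_eq_false]
          intro m hm
          rw [(hall m hm).2, hv]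
          simp
      | true =>
          simp only [Option.map_some, Option.getD_some]
          rw [hv, List.any_eq_true]
          obtain ⟨m, hm⟩ := List.exists_mem_of_ne_nil gs hne
          exact ⟨m, hm, by rw [(hall m hm).2, hv]⟩

-- B-side membership
lemma charAt_getElem (g : List String) (hGE : RectGE g) (y x : Nat)
    (hy : y < g.length) (hx : x < pvCols g) :
    pvCharAt g y x = (g[y]).toList[x]'(lt_of_lt_of_le hx (hGE _ (List.getElem_mem hy))) := by
  unfold pvCharAt
  rw [List.getD_eq_getElem g "" hy,
      List.getD_eq_getElem _ ' ' (lt_of_lt_of_le hx (hGE _ (List.getElem_mem hy)))]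

lemma mem_pts (g : List String) (hGE : RectGE g) (p : Nat × Nat) :
    p ∈ pvPts g ↔ p.2 < g.length ∧ p.1 < pvCols g ∧ pvCharAt g p.2 p.1 = '#' := by
  by_cases hg : g = []
  · subst hg; simp [pvPts]
  · have hcols : pvColsB g = pvCols g := by simp [pvColsB, pvCols, hg]
    unfold pvPts
    rw [hcols]
    simp only [List.mem_flatMap, List.mem_filterMap, List.mem_zipIdx_iff_getElem?]
    constructor
    · rintro ⟨ry, hry, cx, hcx, hf⟩
      by_cases hch : cx.1 = '#'
      · rw [if_pos hch] at hf
        obtain rfl : (cx.2, ry.2) = p := Option.some.inj hf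
        obtain ⟨hylt, hrow⟩ := List.getElem?_eq_some_iff.mp hry
        rw [List.getElem?_take] at hcx
        by_cases hxlt : cx.2 < pvCols g
        · rw [if_pos hxlt] at hcx
          obtain ⟨hxlen, hel⟩ := List.getElem?_eq_some_iff.mp hcx
          refine ⟨hylt, hxlt, ?_⟩
          rw [charAt_getElem g hGE _ _ hylt hxlt]
          have hlist : (g[ry.2]).toList = ry.1.toList := by rw [hrow]
          rw [List.getElem_of_eq hlist]
          exact hel.trans hch
        · rw [if_neg hxlt] at hcx
          exact absurd hcx (by simp)
      · rw [if_neg hch] at hf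
        exact absurd hf (by simp)
    · rintro ⟨hy, hx, hchar⟩
      have hlenrow : pvCols g ≤ (g[p.2]).toList.length := hGE _ (List.getElem_mem hy)
      refine ⟨(g[p.2], p.2), List.getElem?_eq_some_iff.mpr ⟨hy, rfl⟩,
              (pvCharAt g p.2 p.1, p.1), ?_, ?_⟩
      · rw [List.getElem?_take, if_pos hx]
        rw [List.getElem?_eq_some_iff]
        exact ⟨lt_of_lt_of_le hx hlenrow, (charAt_getElem g hGE _ _ hy hx).symm⟩
      · rw [if_pos hchar]

lemma mem_pts_fst (g : List String) (hGE : RectGE g) (a : Nat) :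
    a ∈ (pvPts g).map (·.1) ↔ HasX g a := by
  rw [List.mem_map]
  unfold HasX
  constructor
  · rintro ⟨p, hp, rfl⟩
    obtain ⟨hy, hx, hchar⟩ := (mem_pts g hGE p).mp hp
    exact ⟨p.2, hy, hx, hchar⟩
  · rintro ⟨y, hy, hx, hchar⟩
    exact ⟨(a, y), (mem_pts g hGE (a, y)).mpr ⟨hy, hx, hchar⟩, rfl⟩

lemma mem_pts_snd (g : List String) (hGE : RectGE g) (b : Nat) :
    b ∈ (pvPts g).map (·.2) ↔ HasY g b := by
  rw [List.mem_map]
  unfold HasY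
  constructor
  · rintro ⟨p, hp, rfl⟩
    obtain ⟨hy, hx, hchar⟩ := (mem_pts g hGE p).mp hp
    exact ⟨p.1, hx, hy, hchar⟩
  · rintro ⟨x, hx, hb, hchar⟩
    exact ⟨(x, b), (mem_pts g hGE (x, b)).mpr ⟨hb, hx, hchar⟩, rfl⟩

-- the fit test A performs on a good shape, reduced to its bounding box
lemma good_unpack (g : List String) (hgood : pvGoodShape g = true) :
    g ≠ [] ∧ 0 < g.length ∧ 0 < pvCols g ∧ RectGE g := by
  simp only [pvGoodShape, Bool.and_eq_true, Bool.not_eq_true', List.isEmpty_eq_false_iff,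
    decide_eq_true_eq, List.all_eq_true] at hgood
  obtain ⟨⟨hne, hC⟩, hGE⟩ := hgood
  exact ⟨hne, List.length_pos_iff.mpr hne, hC, fun row hrow => hGE row hrow⟩

lemma contains_of_get?_some (d : PySem.Dict Int (List String)) (k : Int) (v : List String)
    (h : d.get? k = some v) : d.contains k = true := by
  by_contra hcon
  rw [Bool.not_eq_true, ← PySem.Dict.get?_eq_none_iff_contains, h] at hcon
  cases hcon

-- the per-shape equivalence, assembled
lemma loop_eq (W H : Int) (shapes : List (Int × List String)) :
    ∀ (counts : List Int) (idx : Nat) (total : Int),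
      (∀ i, i < counts.length → counts.getD i 0 ≠ 0 →
        (∀ j, j ≤ i → counts.getD j 0 ≠ 0 →
          (PySem.Dict.mk shapes).contains ((idx + j : Nat) : Int) = true) →
        ((PySem.Dict.mk shapes).get? ((idx + i : Nat) : Int)).all pvGoodShape = true) →
      pvLoopA W H shapes counts idx total = pvLoopB W H shapes counts idx total := by
  intro counts
  induction counts with
  | nil => intro idx total _; rfl
  | cons c rest ih =>
      intro idx total hpre
      by_cases hc : c = 0
      · have hrest : ∀ i, i < rest.length → rest.getD i 0 ≠ 0 →
            (∀ j, j ≤ i → rest.getD j 0 ≠ 0 →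
              (PySem.Dict.mk shapes).contains ((idx + 1 + j : Nat) : Int) = true) →
            ((PySem.Dict.mk shapes).get? ((idx + 1 + i : Nat) : Int)).all pvGoodShape = true := by
          intro i hi hne hkeys
          have h := hpre (i + 1) (by simpa using Nat.succ_lt_succ hi) (by simpa using hne) ?_
          · have harith : idx + (i + 1) = idx + 1 + i := by omega
            rwa [harith] at h
          · intro j hj hjne
            cases j with
            | zero => exact absurd (by simpa using hjne) (by simpa using hc)
            | succ j' =>
                have h' := hkeys j' (by omega) (by simpa using hjne)
                have harith : idx + (j' + 1) = idx + 1 + j' := by omega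
                rwa [harith]
        simp only [pvLoopA, pvLoopB, if_pos hc]
        exact ih (idx + 1) total hrest
      · simp only [pvLoopA, pvLoopB, if_neg hc]
        cases hshp : (PySem.Dict.mk shapes).get? ((idx : Nat) : Int) with
        | none => rfl
        | some g =>
            dsimp only
            have hcont : (PySem.Dict.mk shapes).contains ((idx : Nat) : Int) = true :=
              contains_of_get?_some _ _ _ hshp
            have hrest : ∀ i, i < rest.length → rest.getD i 0 ≠ 0 →
                (∀ j, j ≤ i → rest.getD j 0 ≠ 0 →
                  (PySem.Dict.mk shapes).contains ((idx + 1 + j : Nat) : Int) = true) →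
                ((PySem.Dict.mk shapes).get? ((idx + 1 + i : Nat) : Int)).all pvGoodShape = true := by
              intro i hi hne hkeys
              have h := hpre (i + 1) (by simpa using Nat.succ_lt_succ hi) (by simpa using hne) ?_
              · have harith : idx + (i + 1) = idx + 1 + i := by omega
                rwa [harith] at h
              · intro j hj hjne
                cases j with
                | zero => simpa [Nat.add_zero] using hcont
                | succ j' =>
                    have h' := hkeys j' (by omega) (by simpa using hjne)
                    have harith : idx + (j' + 1) = idx + 1 + j' := by omega
                    rwa [harith]
            have hgood : pvGoodShape g = true := by
              have h := hpre 0 (by simp) (by simpa using hc) ?_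
              · rw [Nat.add_zero, hshp] at h
                simpa using h
              · intro j hj _
                have hj0 : j = 0 := by omega
                subst hj0
                simpa [Nat.add_zero] using hcont
            obtain ⟨hne, hR, hC, hGE⟩ := good_unpack g hgood
            obtain ⟨hmem, hgn⟩ := mem_grids g hR hC
            have hany : (pvSizes (pvGrids g)).any (pvFit W H)
                = ((pvBBox g).map (pvFit W H)).getD false :=
              any_fit W H (pvGrids g) (pvBBox g) hgn hmem
            by_cases hp : pvPts g = []
            · have hnoX : ¬ ∃ a, HasX g a := by
                rintro ⟨a, y, hy, hx, hch⟩
                have : (a, y) ∈ pvPts g := (mem_pts g hGE (a, y)).mpr ⟨hy, hx, hch⟩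
                rw [hp] at this
                exact absurd this (by simp)
              rw [hany, bbox_none g hnoX, if_pos hp]
              simp
            · obtain ⟨q, hq⟩ := List.exists_mem_of_ne_nil _ hp
              have hneX : ∃ a, HasX g a :=
                ⟨q.1, (mem_pts_fst g hGE q.1).mp (List.mem_map.mpr ⟨q, hq, rfl⟩)⟩
              obtain ⟨x₀, x₁, y₀, y₁, hx0, hx1, hy0, hy1, hxb, hyb, hbox⟩ := bbox_spec g hneX
              have hmaxx : ((pvPts g).map (·.1)).max?.getD 0 = x₁ :=
                max_getD_eq _ _ ((mem_pts_fst g hGE x₁).mpr hx1)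
                  (fun a ha => (hxb a ((mem_pts_fst g hGE a).mp ha)).2)
              have hminx : ((pvPts g).map (·.1)).min?.getD 0 = x₀ :=
                min_getD_eq _ _ ((mem_pts_fst g hGE x₀).mpr hx0)
                  (fun a ha => (hxb a ((mem_pts_fst g hGE a).mp ha)).1)
              have hmaxy : ((pvPts g).map (·.2)).max?.getD 0 = y₁ :=
                max_getD_eq _ _ ((mem_pts_snd g hGE y₁).mpr hy1)
                  (fun b hb => (hyb b ((mem_pts_snd g hGE b).mp hb)).2)
              have hminy : ((pvPts g).map (·.2)).min?.getD 0 = y₀ :=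
                min_getD_eq _ _ ((mem_pts_snd g hGE y₀).mpr hy0)
                  (fun b hb => (hyb b ((mem_pts_snd g hGE b).mp hb)).1)
              rw [hany, hbox, if_neg hp, hmaxx, hminx, hmaxy, hminy]
              simp only [Option.map_some, Option.getD_some]
              by_cases hfitP : (((x₁ - x₀ + 1 : Nat) : Int) ≤ W ∧ ((y₁ - y₀ + 1 : Nat) : Int) ≤ H)
                  ∨ (((x₁ - x₀ + 1 : Nat) : Int) ≤ H ∧ ((y₁ - y₀ + 1 : Nat) : Int) ≤ W)
              · have hfit : pvFit W H (x₁ - x₀ + 1, y₁ - y₀ + 1) = true := by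
                  simp only [pvFit, decide_eq_true_eq]
                  exact hfitP
                rw [if_pos hfit, if_pos hfitP]
                exact ih (idx + 1) _ hrest
              · have hfit : pvFit W H (x₁ - x₀ + 1, y₁ - y₀ + 1) = false := by
                  simp only [pvFit, decide_eq_false_iff_not]
                  exact hfitP
                rw [if_neg (by simp [hfit]), if_neg hfitP]

-- ===== VERDICT (by name: the statement is the Claim_ definition above) =====
theorem can_fit_region_spec : Claim_equal_can_fit_region := by
  intro W H shapes counts _ hPre
  unfold Spec_can_fit_region can_fit_region can_fit_region_alt
  apply loop_eq W H shapes counts 0 0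
  intro i hi hne hkeys
  have h := hPre i hi hne ?_
  · simpa [Nat.zero_add] using h
  · intro j hj hjne
    have h' := hkeys j hj hjne
    simpa [Nat.zero_add] using h'
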